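-- pv_equiv track=rewrite | github.com/MrBrantCode/unitest_baseline | mut_generate/mist_train_taco/taco_8202/solution.py | count_valid_arrays
-- ===== SOURCE A (Python) =====
-- def count_valid_arrays(n, k, l, m):
--     def calc(n, m):
--         if n == 1:
--             return [[1, 0], [0, 1]]
--         a = calc(n // 2, m)
--         if n % 2 == 0:
--             res00 = a[0][0] * a[0][0] % m
--             res00 = (res00 + a[0][0] * a[1][0]) % m
--             res00 = (res00 + a[0][1] * a[0][0]) % m
--             res01 = a[0][0] * a[0][1] % m
--             res01 = (res01 + a[0][0] * a[1][1]) % m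
--             res01 = (res01 + a[0][1] * a[0][1]) % m
--             res10 = a[1][0] * a[0][0] % m
--             res10 = (res10 + a[1][0] * a[1][0]) % m
--             res10 = (res10 + a[1][1] * a[0][0]) % m
--             res11 = a[1][0] * a[0][1] % m
--             res11 = (res11 + a[1][0] * a[1][1]) % m
--             res11 = (res11 + a[1][1] * a[0][1]) % m
--             return [[res00, res01], [res10, res11]]
--         else:
--             res00 = a[0][0] * a[0][0] * 2 % m
--             res00 = (res00 + a[0][0] * a[1][0]) % m
--             res00 = (res00 + a[0][1] * a[0][0]) % m
--             res00 = (res00 + a[0][1] * a[1][0]) % m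
--             res01 = a[0][0] * a[0][1] * 2 % m
--             res01 = (res01 + a[0][0] * a[1][1]) % m
--             res01 = (res01 + a[0][1] * a[0][1]) % m
--             res01 = (res01 + a[0][1] * a[1][1]) % m
--             res10 = a[1][0] * a[0][0] * 2 % m
--             res10 = (res10 + a[1][0] * a[1][0]) % m
--             res10 = (res10 + a[1][1] * a[0][0]) % m
--             res10 = (res10 + a[1][1] * a[1][0]) % m
--             res11 = a[1][0] * a[0][1] * 2 % m
--             res11 = (res11 + a[1][0] * a[1][1]) % m
--             res11 = (res11 + a[1][1] * a[0][1]) % m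
--             res11 = (res11 + a[1][1] * a[1][1]) % m
--             return [[res00, res01], [res10, res11]]
--
--     def binpow(a, p, m):
--         if p == 0:
--             return 1 % m
--         if p == 1:
--             return a % m
--         ans = binpow(a, p // 2, m)
--         ans = ans * ans % m
--         if p % 2 == 1:
--             ans = ans * a % m
--         return ans
--
--     ans = [0, 0]
--     x = calc(n, m)
--     ans[0] = (x[0][0] + x[0][1] + x[1][0] + x[1][1]) % m
--     ans[1] = ((binpow(2, n, m) - ans[0]) % m + m) % m
--     res = 1
--     for i in range(l):
--         res = res * ans[k & 1] % m
--         k >>= 1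
--     if k > 0:
--         res = 0
--     return res % m
-- ===== SOURCE B (Python) =====
-- def count_valid_arrays(n, k, l, m):
--     # Same count, but the l-step bit-product is grouped into ans0^zeros * ans1^ones
--     # via modular exponentiation, and the matrix power is an iterative binary
--     # exponentiation of the Fibonacci matrix instead of A's inlined recursion.
--     def matmul(x, y):
--         a, b, c, d = x
--         e, f, g, h = y
--         return ((a * e + b * g) % m, (a * f + b * h) % m,
--                 (c * e + d * g) % m, (c * f + d * h) % m)
--
--     r = (1, 0, 0, 1)
--     p = (1, 1, 1, 0)
--     t = n - 1
--     while t > 0: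
--         if t & 1:
--             r = matmul(r, p)
--         p = matmul(p, p)
--         t >>= 1
--     ans0 = (r[0] + r[1] + r[2] + r[3]) % m
--     ans1 = ((pow(2, n, m) - ans0) % m + m) % m
--     ll = l if l > 0 else 0
--     if (k >> ll) > 0:
--         return 0
--     ones = (k % (1 << ll)).bit_count()
--     return pow(ans0, ll - ones, m) * pow(ans1, ones, m) % m
-- ===== Notes on version B (the rewrite author's own statement) =====
-- stated objective: faster
-- what changed: The l-iteration bit-product loop is replaced by counting the set low-order bits of k once and combining ans0^zeros * ans1^ones with built-in three-argument pow, and the recursive inlined matrix-squaring 'calc' is replaced by an iterative binary matrix exponentiation with a small matmul helper.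
import Mathlib
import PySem

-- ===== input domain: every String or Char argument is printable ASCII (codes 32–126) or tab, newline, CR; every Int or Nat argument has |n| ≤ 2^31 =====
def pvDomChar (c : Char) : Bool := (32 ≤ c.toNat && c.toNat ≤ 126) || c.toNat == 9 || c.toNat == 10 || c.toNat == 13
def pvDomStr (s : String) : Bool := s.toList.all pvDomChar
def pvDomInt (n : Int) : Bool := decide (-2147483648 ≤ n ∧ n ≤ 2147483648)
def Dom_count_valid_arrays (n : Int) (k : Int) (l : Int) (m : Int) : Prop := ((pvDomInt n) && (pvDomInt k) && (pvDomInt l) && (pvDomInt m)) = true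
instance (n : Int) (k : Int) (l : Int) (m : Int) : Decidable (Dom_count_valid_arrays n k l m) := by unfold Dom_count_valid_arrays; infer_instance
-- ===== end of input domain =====

-- B replaces A's l-step bit-product loop by one bit-count plus two modular exponentiations,
-- and A's recursive inlined matrix squaring by an iterative matrix binary exponentiation (objective: faster).

-- ===== PORT A =====

-- inner helper `calc`: Python's base case is `n == 1`; for n ≤ 0 Python recurses forever
-- (excluded by Pre_), so the guard `n ≤ 1` here is a pure totality guard.
def pvCalcA (n : Int) (m : Int) : Int × Int × Int × Int :=
  if n ≤ 1 then (1, 0, 0, 1)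
  else
    let a := pvCalcA (PySem.Int.floordiv n 2) m
    let a00 := a.1; let a01 := a.2.1; let a10 := a.2.2.1; let a11 := a.2.2.2
    if PySem.Int.mod n 2 = 0 then
      (PySem.Int.mod (PySem.Int.mod (PySem.Int.mod (a00*a00) m + a00*a10) m + a01*a00) m,
       PySem.Int.mod (PySem.Int.mod (PySem.Int.mod (a00*a01) m + a00*a11) m + a01*a01) m,
       PySem.Int.mod (PySem.Int.mod (PySem.Int.mod (a10*a00) m + a10*a10) m + a11*a00) m,
       PySem.Int.mod (PySem.Int.mod (PySem.Int.mod (a10*a01) m + a10*a11) m + a11*a01) m)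
    else
      (PySem.Int.mod (PySem.Int.mod (PySem.Int.mod (PySem.Int.mod (a00*a00*2) m + a00*a10) m + a01*a00) m + a01*a10) m,
       PySem.Int.mod (PySem.Int.mod (PySem.Int.mod (PySem.Int.mod (a00*a01*2) m + a00*a11) m + a01*a01) m + a01*a11) m,
       PySem.Int.mod (PySem.Int.mod (PySem.Int.mod (PySem.Int.mod (a10*a00*2) m + a10*a10) m + a11*a00) m + a11*a10) m,
       PySem.Int.mod (PySem.Int.mod (PySem.Int.mod (PySem.Int.mod (a10*a01*2) m + a10*a11) m + a11*a01) m + a11*a11) m)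
  termination_by n.toNat
  decreasing_by
    rw [PySem.Int.floordiv_eq_ediv_of_pos (by norm_num : (0:Int) < 2)]; omega

-- inner helper `binpow`: Python's base case is `p == 0` (for p < 0 Python recurses forever;
-- under Pre_ it is only called with p = n ≥ 1, so `p ≤ 0` is a pure totality guard).
def pvBinpowA (a : Int) (p : Int) (m : Int) : Int :=
  if p ≤ 0 then PySem.Int.mod 1 m
  else if p = 1 then PySem.Int.mod a m
  else
    let ans := pvBinpowA a (PySem.Int.floordiv p 2) m
    let ans2 := PySem.Int.mod (ans * ans) m
    if PySem.Int.mod p 2 = 1 then PySem.Int.mod (ans2 * a) m else ans2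
  termination_by p.toNat
  decreasing_by
    rw [PySem.Int.floordiv_eq_ediv_of_pos (by norm_num : (0:Int) < 2)]; omega

-- the `for i in range(l)` loop: state (res, k); `k >>= 1` is arithmetic shift.
def pvLoopA (m : Int) (a0 : Int) (a1 : Int) : Nat → Int → Int → Int × Int
  | 0, res, kk => (res, kk)
  | t+1, res, kk =>
      pvLoopA m a0 a1 t
        (PySem.Int.mod (res * (if PySem.Int.band kk 1 = 1 then a1 else a0)) m)
        (kk >>> (1:Nat))

def count_valid_arrays (n : Int) (k : Int) (l : Int) (m : Int) : Int :=
  let x := pvCalcA n m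
  let ans0 := PySem.Int.mod (x.1 + x.2.1 + x.2.2.1 + x.2.2.2) m
  let ans1 := PySem.Int.mod (PySem.Int.mod (pvBinpowA 2 n m - ans0) m + m) m
  let rk := pvLoopA m ans0 ans1 l.toNat 1 k
  PySem.Int.mod (if rk.2 > 0 then 0 else rk.1) m

-- ===== PORT B =====

-- Source B's matmul: 2x2 matrices as 4-tuples, every entry reduced mod m.
def pvMatmulB (m : Int) (x : Int × Int × Int × Int) (y : Int × Int × Int × Int) : Int × Int × Int × Int :=
  (PySem.Int.mod (x.1 * y.1 + x.2.1 * y.2.2.1) m,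
   PySem.Int.mod (x.1 * y.2.1 + x.2.1 * y.2.2.2) m,
   PySem.Int.mod (x.2.2.1 * y.1 + x.2.2.2 * y.2.2.1) m,
   PySem.Int.mod (x.2.2.1 * y.2.1 + x.2.2.2 * y.2.2.2) m)

-- Source B's `while t > 0` binary-exponentiation loop.
def pvLoopB (m : Int) (r : Int × Int × Int × Int) (p : Int × Int × Int × Int) (t : Int) : Int × Int × Int × Int :=
  if t ≤ 0 then r
  else pvLoopB m (if PySem.Int.band t 1 = 1 then pvMatmulB m r p else r) (pvMatmulB m p p) (t >>> (1:Nat))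
  termination_by t.toNat
  decreasing_by
    rw [Int.shiftRight_eq_div_pow]; simp only [pow_one, Nat.cast_ofNat]; omega

-- pow(b, e, m) is PySem.Int.powMod; the exponents n, ll - ones, ones are nonnegative under Pre_
-- (ones ≤ ll is proved below), so the Nat exponents are exact.
def count_valid_arrays_alt (n : Int) (k : Int) (l : Int) (m : Int) : Int :=
  let r := pvLoopB m (1, 0, 0, 1) (1, 1, 1, 0) (n - 1)
  let ans0 := PySem.Int.mod (r.1 + r.2.1 + r.2.2.1 + r.2.2.2) m
  let ans1 := PySem.Int.mod (PySem.Int.mod (PySem.Int.powMod 2 n.toNat m - ans0) m + m) m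
  let ll := (if l > 0 then l else 0).toNat
  if k >>> ll > 0 then 0
  else
    let ones := PySem.Int.bitCount (PySem.Int.mod k ((1:Int) <<< ll))
    PySem.Int.mod (PySem.Int.powMod ans0 (ll - ones) m * PySem.Int.powMod ans1 ones m) m

-- ===== PRECONDITION & SPEC =====
-- Pre_ excludes exactly the inputs on which Python A raises: for n ≤ 0 `calc` recurses forever
-- (RecursionError), and for m = 0 `% m` raises ZeroDivisionError.
def Pre_count_valid_arrays (n : Int) (k : Int) (l : Int) (m : Int) : Prop := 1 ≤ n ∧ m ≠ 0
instance (n : Int) (k : Int) (l : Int) (m : Int) : Decidable (Pre_count_valid_arrays n k l m) := by unfold Pre_count_valid_arrays; infer_instance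

def pvWitness_count_valid_arrays : Int × Int × Int × Int := (3, 5, 4, 7)

def Spec_count_valid_arrays (n : Int) (k : Int) (l : Int) (m : Int) (out : Int) : Prop := out = count_valid_arrays_alt n k l m
instance (n : Int) (k : Int) (l : Int) (m : Int) (out : Int) : Decidable (Spec_count_valid_arrays n k l m out) := by unfold Spec_count_valid_arrays; infer_instance

-- ===== CLAIM (what is proved, stated in full; the proofs are below) =====
def Claim_equal_count_valid_arrays : Prop := ∀ (n : Int) (k : Int) (l : Int) (m : Int), Dom_count_valid_arrays n k l m → Pre_count_valid_arrays n k l m → Spec_count_valid_arrays n k l m (count_valid_arrays n k l m)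

-- ===== LEMMAS AND PROOFS =====

-- Python `%` respects congruence: two integers in the same class mod m have the same `a % m`.
theorem pvmod_self (a m : Int) : PySem.Int.mod a m ≡ a [ZMOD m] := by
  have h := PySem.Int.floordiv_mul_add_mod a m
  exact Int.modEq_iff_dvd.mpr ⟨PySem.Int.floordiv a m, by rw [mul_comm]; linarith⟩

theorem pvmod_cong {m a b : Int} (hm : m ≠ 0) (h : a ≡ b [ZMOD m]) :
    PySem.Int.mod a m = PySem.Int.mod b m := by
  rcases lt_or_gt_of_ne hm with hneg | hpos
  · have e1 := PySem.Int.mod_neg_neg (-a) (-m)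
    have e2 := PySem.Int.mod_neg_neg (-b) (-m)
    simp only [neg_neg] at e1 e2
    rw [e1, e2, PySem.Int.mod_eq_emod_of_pos (by omega : (0:Int) < -m),
        PySem.Int.mod_eq_emod_of_pos (by omega : (0:Int) < -m)]
    have := h.neg
    simp only [Int.ModEq, Int.emod_neg] at this ⊢
    omega
  · rw [PySem.Int.mod_eq_emod_of_pos hpos, PySem.Int.mod_eq_emod_of_pos hpos]; exact h

theorem pvmod_zero {m : Int} (hm : m ≠ 0) : PySem.Int.mod 0 m = 0 := by
  rcases lt_or_gt_of_ne hm with hneg | hpos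
  · have e := PySem.Int.mod_neg_neg 0 (-m)
    simp only [neg_zero, neg_neg] at e
    rw [e, PySem.Int.mod_eq_emod_of_pos (by omega : (0:Int) < -m)]
    simp
  · rw [PySem.Int.mod_eq_emod_of_pos hpos]; simp

-- the three/four-step `(… % m + t) % m` accumulation chains of A's `calc`
theorem pvchain3 (m x1 x2 x3 : Int) :
    PySem.Int.mod (PySem.Int.mod (PySem.Int.mod x1 m + x2) m + x3) m ≡ x1 + x2 + x3 [ZMOD m] :=
  (pvmod_self _ m).trans (Int.ModEq.add_right x3
    ((pvmod_self _ m).trans (Int.ModEq.add_right x2 (pvmod_self x1 m))))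

theorem pvchain4 (m x1 x2 x3 x4 : Int) :
    PySem.Int.mod (PySem.Int.mod (PySem.Int.mod (PySem.Int.mod x1 m + x2) m + x3) m + x4) m
      ≡ x1 + x2 + x3 + x4 [ZMOD m] :=
  (pvmod_self _ m).trans (Int.ModEq.add_right x4 (pvchain3 m x1 x2 x3))

-- pure (un-reduced) 2x2 integer matrices, their product and powers of a matrix
def pvTmul (x y : Int × Int × Int × Int) : Int × Int × Int × Int :=
  (x.1 * y.1 + x.2.1 * y.2.2.1, x.1 * y.2.1 + x.2.1 * y.2.2.2,
   x.2.2.1 * y.1 + x.2.2.2 * y.2.2.1, x.2.2.1 * y.2.1 + x.2.2.2 * y.2.2.2)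

def pvT : Int × Int × Int × Int := (1, 1, 1, 0)

def pvTpow (p : Int × Int × Int × Int) : Nat → Int × Int × Int × Int
  | 0 => (1, 0, 0, 1)
  | t+1 => pvTmul (pvTpow p t) p

theorem pvTmul_assoc (x y z : Int × Int × Int × Int) :
    pvTmul (pvTmul x y) z = pvTmul x (pvTmul y z) := by
  simp only [pvTmul, Prod.mk.injEq]
  refine ⟨by ring, by ring, by ring, by ring⟩

theorem pvTmul_one_left (x : Int × Int × Int × Int) : pvTmul (1, 0, 0, 1) x = x := by
  refine Prod.ext ?_ (Prod.ext ?_ (Prod.ext ?_ ?_)) <;> simp [pvTmul]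

theorem pvTmul_one_right (x : Int × Int × Int × Int) : pvTmul x (1, 0, 0, 1) = x := by
  refine Prod.ext ?_ (Prod.ext ?_ (Prod.ext ?_ ?_)) <;> simp [pvTmul]

theorem pvTpow_add (p : Int × Int × Int × Int) (u v : Nat) :
    pvTpow p (u + v) = pvTmul (pvTpow p u) (pvTpow p v) := by
  induction v with
  | zero => simp [pvTpow, pvTmul_one_right]
  | succ v ih =>
      show pvTpow p (u + v + 1) = pvTmul (pvTpow p u) (pvTmul (pvTpow p v) p)
      rw [show pvTpow p (u + v + 1) = pvTmul (pvTpow p (u + v)) p from rfl, ih, pvTmul_assoc]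

theorem pvTpow_one (p : Int × Int × Int × Int) : pvTpow p 1 = p := by
  show pvTmul (1, 0, 0, 1) p = p
  exact pvTmul_one_left p

theorem pvTpow_sq (p : Int × Int × Int × Int) (u : Nat) :
    pvTpow (pvTmul p p) u = pvTpow p (2 * u) := by
  induction u with
  | zero => rfl
  | succ u ih =>
      show pvTmul (pvTpow (pvTmul p p) u) (pvTmul p p) = pvTpow p (2 * (u + 1))
      rw [ih, show 2 * (u + 1) = 2 * u + (1 + 1) from by ring, pvTpow_add, pvTpow_add, pvTpow_one]

-- componentwise congruence of two matrices mod m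
def pvMcg (m : Int) (x y : Int × Int × Int × Int) : Prop :=
  x.1 ≡ y.1 [ZMOD m] ∧ x.2.1 ≡ y.2.1 [ZMOD m] ∧ x.2.2.1 ≡ y.2.2.1 [ZMOD m] ∧ x.2.2.2 ≡ y.2.2.2 [ZMOD m]

theorem pvMcg_refl (m : Int) (x : Int × Int × Int × Int) : pvMcg m x x :=
  ⟨Int.ModEq.refl _, Int.ModEq.refl _, Int.ModEq.refl _, Int.ModEq.refl _⟩

theorem pvMcg_matmul {m : Int} {x x' y y' : Int × Int × Int × Int}
    (hx : pvMcg m x x') (hy : pvMcg m y y') :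
    pvMcg m (pvMatmulB m x y) (pvTmul x' y') := by
  obtain ⟨hx1, hx2, hx3, hx4⟩ := hx
  obtain ⟨hy1, hy2, hy3, hy4⟩ := hy
  exact ⟨(pvmod_self _ m).trans ((hx1.mul hy1).add (hx2.mul hy3)),
         (pvmod_self _ m).trans ((hx1.mul hy2).add (hx2.mul hy4)),
         (pvmod_self _ m).trans ((hx3.mul hy1).add (hx4.mul hy3)),
         (pvmod_self _ m).trans ((hx3.mul hy2).add (hx4.mul hy4))⟩

-- A's even step is (a·T·a) mod m, componentwise
theorem pvstep_even (m a00 a01 a10 a11 b00 b01 b10 b11 : Int)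
    (h00 : a00 ≡ b00 [ZMOD m]) (h01 : a01 ≡ b01 [ZMOD m])
    (h10 : a10 ≡ b10 [ZMOD m]) (h11 : a11 ≡ b11 [ZMOD m]) :
    pvMcg m
      (PySem.Int.mod (PySem.Int.mod (PySem.Int.mod (a00*a00) m + a00*a10) m + a01*a00) m,
       PySem.Int.mod (PySem.Int.mod (PySem.Int.mod (a00*a01) m + a00*a11) m + a01*a01) m,
       PySem.Int.mod (PySem.Int.mod (PySem.Int.mod (a10*a00) m + a10*a10) m + a11*a00) m,
       PySem.Int.mod (PySem.Int.mod (PySem.Int.mod (a10*a01) m + a10*a11) m + a11*a01) m)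
      (pvTmul (pvTmul (b00, b01, b10, b11) pvT) (b00, b01, b10, b11)) := by
  simp only [pvMcg, pvTmul, pvT]
  refine ⟨?_, ?_, ?_, ?_⟩
  · calc _ ≡ a00*a00 + a00*a10 + a01*a00 [ZMOD m] := pvchain3 m _ _ _
      _ ≡ b00*b00 + b00*b10 + b01*b00 [ZMOD m] := ((h00.mul h00).add (h00.mul h10)).add (h01.mul h00)
      _ = _ := by ring
  · calc _ ≡ a00*a01 + a00*a11 + a01*a01 [ZMOD m] := pvchain3 m _ _ _
      _ ≡ b00*b01 + b00*b11 + b01*b01 [ZMOD m] := ((h00.mul h01).add (h00.mul h11)).add (h01.mul h01)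
      _ = _ := by ring
  · calc _ ≡ a10*a00 + a10*a10 + a11*a00 [ZMOD m] := pvchain3 m _ _ _
      _ ≡ b10*b00 + b10*b10 + b11*b00 [ZMOD m] := ((h10.mul h00).add (h10.mul h10)).add (h11.mul h00)
      _ = _ := by ring
  · calc _ ≡ a10*a01 + a10*a11 + a11*a01 [ZMOD m] := pvchain3 m _ _ _
      _ ≡ b10*b01 + b10*b11 + b11*b01 [ZMOD m] := ((h10.mul h01).add (h10.mul h11)).add (h11.mul h01)
      _ = _ := by ring

-- A's odd step is (a·T²·a) mod m, componentwise
theorem pvstep_odd (m a00 a01 a10 a11 b00 b01 b10 b11 : Int)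
    (h00 : a00 ≡ b00 [ZMOD m]) (h01 : a01 ≡ b01 [ZMOD m])
    (h10 : a10 ≡ b10 [ZMOD m]) (h11 : a11 ≡ b11 [ZMOD m]) :
    pvMcg m
      (PySem.Int.mod (PySem.Int.mod (PySem.Int.mod (PySem.Int.mod (a00*a00*2) m + a00*a10) m + a01*a00) m + a01*a10) m,
       PySem.Int.mod (PySem.Int.mod (PySem.Int.mod (PySem.Int.mod (a00*a01*2) m + a00*a11) m + a01*a01) m + a01*a11) m,
       PySem.Int.mod (PySem.Int.mod (PySem.Int.mod (PySem.Int.mod (a10*a00*2) m + a10*a10) m + a11*a00) m + a11*a10) m,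
       PySem.Int.mod (PySem.Int.mod (PySem.Int.mod (PySem.Int.mod (a10*a01*2) m + a10*a11) m + a11*a01) m + a11*a11) m)
      (pvTmul (pvTmul (b00, b01, b10, b11) (pvTmul pvT pvT)) (b00, b01, b10, b11)) := by
  simp only [pvMcg, pvTmul, pvT]
  refine ⟨?_, ?_, ?_, ?_⟩
  · calc _ ≡ a00*a00*2 + a00*a10 + a01*a00 + a01*a10 [ZMOD m] := pvchain4 m _ _ _ _
      _ ≡ b00*b00*2 + b00*b10 + b01*b00 + b01*b10 [ZMOD m] :=
          ((((h00.mul h00).mul_right 2).add (h00.mul h10)).add (h01.mul h00)).add (h01.mul h10)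
      _ = _ := by ring
  · calc _ ≡ a00*a01*2 + a00*a11 + a01*a01 + a01*a11 [ZMOD m] := pvchain4 m _ _ _ _
      _ ≡ b00*b01*2 + b00*b11 + b01*b01 + b01*b11 [ZMOD m] :=
          ((((h00.mul h01).mul_right 2).add (h00.mul h11)).add (h01.mul h01)).add (h01.mul h11)
      _ = _ := by ring
  · calc _ ≡ a10*a00*2 + a10*a10 + a11*a00 + a11*a10 [ZMOD m] := pvchain4 m _ _ _ _
      _ ≡ b10*b00*2 + b10*b10 + b11*b00 + b11*b10 [ZMOD m] :=
          ((((h10.mul h00).mul_right 2).add (h10.mul h10)).add (h11.mul h00)).add (h11.mul h10)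
      _ = _ := by ring
  · calc _ ≡ a10*a01*2 + a10*a11 + a11*a01 + a11*a11 [ZMOD m] := pvchain4 m _ _ _ _
      _ ≡ b10*b01*2 + b10*b11 + b11*b01 + b11*b11 [ZMOD m] :=
          ((((h10.mul h01).mul_right 2).add (h10.mul h11)).add (h11.mul h01)).add (h11.mul h11)
      _ = _ := by ring

-- A's calc(n, m) is T^(n-1) mod m, componentwise
theorem pvCalcA_cong (m : Int) : ∀ (N : Nat) (n : Int), n.toNat ≤ N → 1 ≤ n →
    pvMcg m (pvCalcA n m) (pvTpow pvT (n - 1).toNat) := by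
  intro N
  induction N with
  | zero => intro n h h1; exact absurd h (by omega)
  | succ N ih =>
    intro n hN h1
    rw [pvCalcA]
    by_cases hle : n ≤ 1
    · have hn1 : n = 1 := le_antisymm hle h1
      subst hn1
      simp only [le_refl, if_pos]
      exact pvMcg_refl m _
    · rw [if_neg hle]
      have hf : PySem.Int.floordiv n 2 = n / 2 :=
        PySem.Int.floordiv_eq_ediv_of_pos (by norm_num)
      rw [hf]
      have hs1 : 1 ≤ n / 2 := by omega
      have hsN : (n / 2).toNat ≤ N := by omega
      have ha := ih (n / 2) hsN hs1
      obtain ⟨h00, h01, h10, h11⟩ := ha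
      by_cases hpar : PySem.Int.mod n 2 = 0
      · rw [if_pos hpar]
        have hmod : n % 2 = 0 := by
          rwa [PySem.Int.mod_eq_emod_of_pos (by norm_num : (0:Int) < 2)] at hpar
        have hexp : (n - 1).toNat = (n / 2 - 1).toNat + 1 + (n / 2 - 1).toNat := by omega
        rw [hexp, pvTpow_add,
            show pvTpow pvT ((n / 2 - 1).toNat + 1) = pvTmul (pvTpow pvT ((n / 2 - 1).toNat)) pvT from
              by rw [pvTpow_add, pvTpow_one]]
        exact pvstep_even m _ _ _ _ _ _ _ _ h00 h01 h10 h11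
      · rw [if_neg hpar]
        have hmod : n % 2 = 1 := by
          rw [PySem.Int.mod_eq_emod_of_pos (by norm_num : (0:Int) < 2)] at hpar
          omega
        have hexp : (n - 1).toNat = (n / 2 - 1).toNat + 2 + (n / 2 - 1).toNat := by omega
        rw [hexp, pvTpow_add,
            show pvTpow pvT ((n / 2 - 1).toNat + 2) =
                pvTmul (pvTpow pvT ((n / 2 - 1).toNat)) (pvTmul pvT pvT) from
              by rw [pvTpow_add, show pvTpow pvT 2 = pvTmul pvT pvT from by decide]]
        exact pvstep_odd m _ _ _ _ _ _ _ _ h00 h01 h10 h11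

-- A's binpow(a, p, m) is the canonical a^p mod m
theorem pvBinpowA_eq (m a : Int) (hm : m ≠ 0) : ∀ (N : Nat) (p : Int), p.toNat ≤ N → 0 ≤ p →
    pvBinpowA a p m = PySem.Int.mod (a ^ p.toNat) m := by
  intro N
  induction N with
  | zero =>
    intro p hN h0
    have hp : p = 0 := by omega
    subst hp
    rw [pvBinpowA]
    simp
  | succ N ih =>
    intro p hN h0
    rw [pvBinpowA]
    by_cases hle : p ≤ 0
    · have hp : p = 0 := le_antisymm hle h0
      subst hp; simp
    · rw [if_neg hle]
      by_cases h1 : p = 1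
      · subst h1; simp
      · rw [if_neg h1]
        have hf : PySem.Int.floordiv p 2 = p / 2 :=
          PySem.Int.floordiv_eq_ediv_of_pos (by norm_num)
        have hq0 : 0 ≤ p / 2 := by omega
        have hqN : (p / 2).toNat ≤ N := by omega
        rw [hf, ih (p / 2) hqN hq0]
        have hsq : PySem.Int.mod (PySem.Int.mod (a ^ (p / 2).toNat) m * PySem.Int.mod (a ^ (p / 2).toNat) m) m
            = PySem.Int.mod (a ^ ((p / 2).toNat + (p / 2).toNat)) m := by
          refine pvmod_cong hm ?_
          calc PySem.Int.mod (a ^ (p / 2).toNat) m * PySem.Int.mod (a ^ (p / 2).toNat) m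
              ≡ a ^ (p / 2).toNat * a ^ (p / 2).toNat [ZMOD m] := (pvmod_self _ m).mul (pvmod_self _ m)
            _ = a ^ ((p / 2).toNat + (p / 2).toNat) := by rw [pow_add]
        by_cases hpar : PySem.Int.mod p 2 = 1
        · rw [if_pos hpar, hsq]
          have hmod : p % 2 = 1 := by
            rwa [PySem.Int.mod_eq_emod_of_pos (by norm_num : (0:Int) < 2)] at hpar
          have hexp : p.toNat = (p / 2).toNat + (p / 2).toNat + 1 := by omega
          rw [hexp]
          refine pvmod_cong hm ?_
          calc PySem.Int.mod (a ^ ((p / 2).toNat + (p / 2).toNat)) m * a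
              ≡ a ^ ((p / 2).toNat + (p / 2).toNat) * a [ZMOD m] := (pvmod_self _ m).mul_right a
            _ = a ^ ((p / 2).toNat + (p / 2).toNat + 1) := by rw [pow_succ]
        · rw [if_neg hpar, hsq]
          have hmod : p % 2 = 0 := by
            rw [PySem.Int.mod_eq_emod_of_pos (by norm_num : (0:Int) < 2)] at hpar
            omega
          have hexp : p.toNat = (p / 2).toNat + (p / 2).toNat := by omega
          rw [hexp]

-- B's matrix loop computes r·p^t mod m, componentwise
theorem pvLoopB_cong (m : Int) : ∀ (N : Nat) (t : Int) (r p r' p' : Int × Int × Int × Int),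
    t.toNat ≤ N → pvMcg m r r' → pvMcg m p p' →
    pvMcg m (pvLoopB m r p t) (pvTmul r' (pvTpow p' t.toNat)) := by
  intro N
  induction N with
  | zero =>
    intro t r p r' p' hN hr hp
    have ht : t ≤ 0 := by omega
    rw [pvLoopB, if_pos ht, show t.toNat = 0 from by omega]
    rw [show pvTpow p' 0 = (1, 0, 0, 1) from rfl, pvTmul_one_right]
    exact hr
  | succ N ih =>
    intro t r p r' p' hN hr hp
    rw [pvLoopB]
    by_cases ht : t ≤ 0
    · rw [if_pos ht, show t.toNat = 0 from by omega]
      rw [show pvTpow p' 0 = (1, 0, 0, 1) from rfl, pvTmul_one_right]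
      exact hr
    · rw [if_neg ht]
      have hsh : t >>> (1:Nat) = t / 2 := by
        rw [Int.shiftRight_eq_div_pow]; norm_num
      have hband : PySem.Int.band t 1 = t % 2 := by
        rw [PySem.Int.band_one, PySem.Int.mod_eq_emod_of_pos (by norm_num : (0:Int) < 2)]
      have hqN : (t / 2).toNat ≤ N := by omega
      have hpp : pvMcg m (pvMatmulB m p p) (pvTmul p' p') := pvMcg_matmul hp hp
      by_cases hpar : PySem.Int.band t 1 = 1
      · have hmod : t % 2 = 1 := by rw [hband] at hpar; exact hpar
        rw [if_pos hpar, hsh]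
        have h := ih (t / 2) (pvMatmulB m r p) (pvMatmulB m p p)
          (pvTmul r' p') (pvTmul p' p') hqN (pvMcg_matmul hr hp) hpp
        have hpure : pvTmul (pvTmul r' p') (pvTpow (pvTmul p' p') (t / 2).toNat)
            = pvTmul r' (pvTpow p' t.toNat) := by
          rw [pvTpow_sq, pvTmul_assoc,
              show t.toNat = 1 + 2 * (t / 2).toNat from by omega,
              pvTpow_add, pvTpow_one]
        rwa [hpure] at h
      · have hmod : t % 2 = 0 := by rw [hband] at hpar; omega
        rw [if_neg hpar, hsh]
        have h := ih (t / 2) r (pvMatmulB m p p) r' (pvTmul p' p') hqN hr hpp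
        have hpure : pvTmul r' (pvTpow (pvTmul p' p') (t / 2).toNat)
            = pvTmul r' (pvTpow p' t.toNat) := by
          rw [pvTpow_sq, show t.toNat = 2 * (t / 2).toNat from by omega]
        rwa [hpure] at h

-- number of set bits among the t lowest bits of k (two's complement), as B computes it
def pvBlow (t : Nat) (k : Int) : Nat := PySem.Int.bitCount (k % 2 ^ t)

theorem pv_emod_two_pow_succ (k : Int) (t : Nat) :
    k % 2 ^ (t + 1) = k % 2 + 2 * (k / 2 % 2 ^ t) := by
  have hP : (0:Int) < 2 ^ t := by positivity
  have h1 : (2:Int) * (k / 2) + k % 2 = k := Int.ediv_add_emod k 2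
  have hmm : (2 * (k / 2)) % (2 * 2 ^ t) = 2 * (k / 2 % 2 ^ t) :=
    Int.mul_emod_mul_of_pos _ _ (by norm_num)
  have hr0 : 0 ≤ k % 2 := Int.emod_nonneg k (by norm_num)
  have hr2 : k % 2 < 2 := Int.emod_lt_of_pos k (by norm_num)
  have hq0 : 0 ≤ k / 2 % 2 ^ t := Int.emod_nonneg _ (by positivity)
  have hq1 : k / 2 % 2 ^ t < 2 ^ t := Int.emod_lt_of_pos _ hP
  have hM : (2:Int) ^ (t + 1) = 2 * 2 ^ t := by ring
  have h2 : k % (2 * 2 ^ t) = (2 * (k / 2) + k % 2) % (2 * 2 ^ t) := by rw [h1]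
  rw [hM, h2, Int.add_emod, hmm,
      show (k % 2) % (2 * 2 ^ t) = k % 2 from Int.emod_eq_of_lt hr0 (by nlinarith),
      Int.emod_eq_of_lt (by nlinarith) (by nlinarith)]
  ring

theorem pvBlow_succ (t : Nat) (k : Int) :
    pvBlow (t + 1) k = (k % 2).toNat + pvBlow t (k / 2) := by
  have hsplit := pv_emod_two_pow_succ k t
  have hr0 : 0 ≤ k % 2 := Int.emod_nonneg k (by norm_num)
  have hr2 : k % 2 < 2 := Int.emod_lt_of_pos k (by norm_num)
  have hq0 : 0 ≤ k / 2 % 2 ^ t := Int.emod_nonneg _ (by positivity)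
  unfold pvBlow
  rcases eq_or_lt_of_le (Int.emod_nonneg k (show (2:Int) ^ (t+1) ≠ 0 from by positivity)) with h0 | hpos
  · have hz1 : k % 2 = 0 := by omega
    have hz2 : k / 2 % 2 ^ t = 0 := by omega
    rw [← h0, hz2, hz1]
    simp [PySem.Int.bitCount_zero]
  · rw [PySem.Int.bitCount_of_pos hpos,
        PySem.Int.mod_eq_emod_of_pos (by norm_num : (0:Int) < 2),
        PySem.Int.floordiv_eq_ediv_of_pos (by norm_num : (0:Int) < 2)]
    have e1 : k % 2 ^ (t + 1) % 2 = k % 2 := by omega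
    have e2 : k % 2 ^ (t + 1) / 2 = k / 2 % 2 ^ t := by omega
    rw [e1, e2]

theorem pvBlow_zero (k : Int) : pvBlow 0 k = 0 := by
  unfold pvBlow
  simp [PySem.Int.bitCount_zero]

theorem pvBlow_le (t : Nat) : ∀ (k : Int), pvBlow t k ≤ t := by
  induction t with
  | zero => intro k; rw [pvBlow_zero]
  | succ t ih =>
    intro k
    rw [pvBlow_succ]
    have hr0 : 0 ≤ k % 2 := Int.emod_nonneg k (by norm_num)
    have hr2 : k % 2 < 2 := Int.emod_lt_of_pos k (by norm_num)
    have := ih (k / 2)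
    omega

theorem pv_shiftRight_one_then (k : Int) (t : Nat) :
    (k >>> (1:Nat)) >>> t = k >>> (t + 1) := by
  simp only [Int.shiftRight_eq_div_pow]
  rw [Int.ediv_ediv_eq_ediv_mul (by positivity : (0:Int) ≤ ((2 ^ 1 : Nat) : Int))]
  push_cast
  congr 1
  ring

-- A's l-step loop: the product is ans0^zeros · ans1^ones over the low bits of k,
-- and the final k is k >> l
theorem pvLoopA_spec (m a0 a1 : Int) : ∀ (t : Nat) (res kk : Int),
    (pvLoopA m a0 a1 t res kk).1 ≡ res * a0 ^ (t - pvBlow t kk) * a1 ^ (pvBlow t kk) [ZMOD m]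
    ∧ (pvLoopA m a0 a1 t res kk).2 = kk >>> t := by
  intro t
  induction t with
  | zero =>
    intro res kk
    constructor
    · simp [pvLoopA, pvBlow_zero]
    · simp [pvLoopA, Int.shiftRight_eq_div_pow]
  | succ t ih =>
    intro res kk
    have hsh : kk >>> (1:Nat) = kk / 2 := by
      rw [Int.shiftRight_eq_div_pow]; norm_num
    have hband : PySem.Int.band kk 1 = kk % 2 := by
      rw [PySem.Int.band_one, PySem.Int.mod_eq_emod_of_pos (by norm_num : (0:Int) < 2)]
    have hr0 : 0 ≤ kk % 2 := Int.emod_nonneg kk (by norm_num)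
    have hr2 : kk % 2 < 2 := Int.emod_lt_of_pos kk (by norm_num)
    have hble := pvBlow_le t (kk / 2)
    have ihh := ih (PySem.Int.mod (res * (if PySem.Int.band kk 1 = 1 then a1 else a0)) m) (kk >>> (1:Nat))
    constructor
    · show (pvLoopA m a0 a1 t _ _).1 ≡ _ [ZMOD m]
      rw [pvBlow_succ]
      by_cases hpar : PySem.Int.band kk 1 = 1
      · have hm1 : kk % 2 = 1 := by rw [hband] at hpar; exact hpar
        rw [hm1]
        have he : (t + 1) - ((1:Int).toNat + pvBlow t (kk / 2)) = t - pvBlow t (kk / 2) := by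
          simp; omega
        rw [he]
        calc (pvLoopA m a0 a1 t _ _).1
            ≡ PySem.Int.mod (res * (if PySem.Int.band kk 1 = 1 then a1 else a0)) m
                * a0 ^ (t - pvBlow t (kk >>> (1:Nat))) * a1 ^ pvBlow t (kk >>> (1:Nat)) [ZMOD m] := ihh.1
          _ ≡ res * (if PySem.Int.band kk 1 = 1 then a1 else a0)
                * a0 ^ (t - pvBlow t (kk >>> (1:Nat))) * a1 ^ pvBlow t (kk >>> (1:Nat)) [ZMOD m] :=
              ((pvmod_self _ m).mul_right _).mul_right _
          _ = res * a1 * a0 ^ (t - pvBlow t (kk / 2)) * a1 ^ pvBlow t (kk / 2) := by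
              rw [if_pos hpar, hsh]
          _ = res * a0 ^ (t - pvBlow t (kk / 2)) * a1 ^ ((1:Int).toNat + pvBlow t (kk / 2)) := by
              rw [show ((1:Int).toNat + pvBlow t (kk / 2)) = pvBlow t (kk / 2) + 1 from by simp; omega,
                  pow_succ]
              ring
      · have hm0 : kk % 2 = 0 := by rw [hband] at hpar; omega
        rw [hm0]
        have he : (t + 1) - ((0:Int).toNat + pvBlow t (kk / 2)) = (t - pvBlow t (kk / 2)) + 1 := by
          simp; omega
        rw [he]
        calc (pvLoopA m a0 a1 t _ _).1
            ≡ PySem.Int.mod (res * (if PySem.Int.band kk 1 = 1 then a1 else a0)) m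
                * a0 ^ (t - pvBlow t (kk >>> (1:Nat))) * a1 ^ pvBlow t (kk >>> (1:Nat)) [ZMOD m] := ihh.1
          _ ≡ res * (if PySem.Int.band kk 1 = 1 then a1 else a0)
                * a0 ^ (t - pvBlow t (kk >>> (1:Nat))) * a1 ^ pvBlow t (kk >>> (1:Nat)) [ZMOD m] :=
              ((pvmod_self _ m).mul_right _).mul_right _
          _ = res * a0 * a0 ^ (t - pvBlow t (kk / 2)) * a1 ^ pvBlow t (kk / 2) := by
              rw [if_neg hpar, hsh]
          _ = res * a0 ^ ((t - pvBlow t (kk / 2)) + 1) * a1 ^ ((0:Int).toNat + pvBlow t (kk / 2)) := by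
              rw [show ((0:Int).toNat + pvBlow t (kk / 2)) = pvBlow t (kk / 2) from by simp,
                  pow_succ]
              ring
    · show (pvLoopA m a0 a1 t _ _).2 = _
      rw [ihh.2, pv_shiftRight_one_then]

-- assembling the tail of both programs: A's loop+final-mod equals B's bit-count+powMod form
theorem pv_final (m a0 a1 k : Int) (L : Nat) (hm : m ≠ 0) :
    PySem.Int.mod (if (pvLoopA m a0 a1 L 1 k).2 > 0 then 0 else (pvLoopA m a0 a1 L 1 k).1) m
      = if k >>> L > 0 then 0
        else PySem.Int.mod
          (PySem.Int.powMod a0 (L - PySem.Int.bitCount (PySem.Int.mod k ((1:Int) <<< L))) m *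
           PySem.Int.powMod a1 (PySem.Int.bitCount (PySem.Int.mod k ((1:Int) <<< L))) m) m := by
  have hsnd := (pvLoopA_spec m a0 a1 L 1 k).2
  have hones : PySem.Int.bitCount (PySem.Int.mod k ((1:Int) <<< L)) = pvBlow L k := by
    rw [Int.shiftLeft_eq, one_mul, PySem.Int.mod_eq_emod_of_pos (by positivity)]
    rfl
  rw [hones, hsnd]
  by_cases hk : k >>> L > 0
  · rw [if_pos hk, if_pos hk, pvmod_zero hm]
  · rw [if_neg hk, if_neg hk]
    refine pvmod_cong hm ?_
    calc (pvLoopA m a0 a1 L 1 k).1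
        ≡ 1 * a0 ^ (L - pvBlow L k) * a1 ^ (pvBlow L k) [ZMOD m] := (pvLoopA_spec m a0 a1 L 1 k).1
      _ = a0 ^ (L - pvBlow L k) * a1 ^ (pvBlow L k) := by ring
      _ ≡ PySem.Int.powMod a0 (L - pvBlow L k) m * PySem.Int.powMod a1 (pvBlow L k) m [ZMOD m] := by
          rw [PySem.Int.powMod_eq, PySem.Int.powMod_eq]
          exact ((pvmod_self _ m).mul (pvmod_self _ m)).symm

-- ===== VERDICT =====
theorem count_valid_arrays_spec : Claim_equal_count_valid_arrays := by
  intro n k l m hdom hpre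
  obtain ⟨hn, hm⟩ := hpre
  unfold Spec_count_valid_arrays
  simp only [count_valid_arrays, count_valid_arrays_alt]
  -- ans0 of A equals ans0 of B
  have hc := pvCalcA_cong m n.toNat n le_rfl hn
  rw [show pvT = ((1:Int), (1:Int), (1:Int), (0:Int)) from rfl] at hc
  have hb := pvLoopB_cong m (n - 1).toNat (n - 1) ((1:Int), (0:Int), (0:Int), (1:Int))
      ((1:Int), (1:Int), (1:Int), (0:Int)) ((1:Int), (0:Int), (0:Int), (1:Int))
      ((1:Int), (1:Int), (1:Int), (0:Int)) le_rfl (pvMcg_refl m _) (pvMcg_refl m _)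
  rw [pvTmul_one_left] at hb
  have hA0B0 : PySem.Int.mod ((pvCalcA n m).1 + (pvCalcA n m).2.1 + (pvCalcA n m).2.2.1 + (pvCalcA n m).2.2.2) m
      = PySem.Int.mod ((pvLoopB m (1, 0, 0, 1) (1, 1, 1, 0) (n - 1)).1 + (pvLoopB m (1, 0, 0, 1) (1, 1, 1, 0) (n - 1)).2.1
          + (pvLoopB m (1, 0, 0, 1) (1, 1, 1, 0) (n - 1)).2.2.1 + (pvLoopB m (1, 0, 0, 1) (1, 1, 1, 0) (n - 1)).2.2.2) m := by
    refine pvmod_cong hm ?_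
    exact (((hc.1.add hc.2.1).add hc.2.2.1).add hc.2.2.2).trans
      ((((hb.1.add hb.2.1).add hb.2.2.1).add hb.2.2.2).symm)
  have hbp : pvBinpowA 2 n m = PySem.Int.powMod 2 n.toNat m := by
    rw [PySem.Int.powMod_eq]
    exact pvBinpowA_eq m 2 hm n.toNat n le_rfl (by omega)
  have hLL : (if l > 0 then l else 0).toNat = l.toNat := by split <;> omega
  rw [hLL, ← hA0B0, ← hbp]
  exact pv_final m _ _ k l.toNat hm
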